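-- pv_equiv track=rewrite | github.com/RahulShah9191/data_structure | dqueue.py | shift_all_0_left
-- ===== SOURCE A (Python) =====
-- from collections import deque
--
-- def shift_all_0_left(input_str):
--     d = deque()
--     for c in input_str:
--         if c == '0':
--             d.appendleft(c)
--         else:
--             d.append(c)
--     return "".join(d)
-- ===== SOURCE B (Python) =====
-- def shift_all_0_left(input_str):
--     zeros = input_str.count('0')
--     rest = ''.join(c for c in input_str if c != '0')
--     return '0' * zeros + rest
-- ===== Notes on version B (the rewrite author's own statement) =====
-- stated objective: simpler
-- what changed: Replaced the deque with its appendleft/append partition by counting the zero characters and prepending that many zeros to the order-preserved remainder (valid since the zeros are indistinguishable).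
import Mathlib
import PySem

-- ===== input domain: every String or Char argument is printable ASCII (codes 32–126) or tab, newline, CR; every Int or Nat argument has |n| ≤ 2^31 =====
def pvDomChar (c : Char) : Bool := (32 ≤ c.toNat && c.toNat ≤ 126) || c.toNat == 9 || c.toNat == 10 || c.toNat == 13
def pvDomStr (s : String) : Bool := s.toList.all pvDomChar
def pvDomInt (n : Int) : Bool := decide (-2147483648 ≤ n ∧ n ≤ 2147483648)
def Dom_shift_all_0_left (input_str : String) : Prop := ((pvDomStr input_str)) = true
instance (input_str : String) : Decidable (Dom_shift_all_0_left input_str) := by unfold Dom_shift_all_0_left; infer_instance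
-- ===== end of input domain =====

-- ===== PORT A =====
-- A: build the deque as a list, '0' prepended, others appended.
def shift_all_0_left (input_str : String) : String :=
  String.mk (input_str.toList.foldl
    (fun d c => if c = '0' then c :: d else d ++ [c]) [])

-- ===== PORT B =====
-- B: count the zeros, prepend them to the order-preserved non-zero characters.
def shift_all_0_left_alt (input_str : String) : String :=
  String.mk (List.replicate (input_str.toList.count '0') '0'
    ++ input_str.toList.filter (fun c => c ≠ '0'))

-- ===== PRECONDITION & SPEC =====
def Spec_shift_all_0_left (input_str : String) (out : String) : Prop := out = shift_all_0_left_alt input_str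
instance (input_str : String) (out : String) : Decidable (Spec_shift_all_0_left input_str out) := by unfold Spec_shift_all_0_left; infer_instance

-- ===== CLAIM (what is proved, stated in full; the proofs are below) =====
def Claim_equal_shift_all_0_left : Prop := ∀ (input_str : String), Dom_shift_all_0_left input_str → Spec_shift_all_0_left input_str (shift_all_0_left input_str)

-- ===== LEMMAS AND PROOFS =====

lemma shift_inv (l : List Char) (z : Nat) (acc : List Char) :
    l.foldl (fun d c => if c = '0' then c :: d else d ++ [c])
      (List.replicate z '0' ++ acc)
    = List.replicate (z + l.count '0') '0' ++ (acc ++ l.filter (fun c => c ≠ '0')) := by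
  induction l generalizing z acc with
  | nil => simp
  | cons c l ih =>
    by_cases hc : c = '0'
    · subst hc
      simp only [List.foldl_cons]
      simp only [if_true]
      have h1 : '0' :: (List.replicate z '0' ++ acc) = List.replicate (z + 1) '0' ++ acc := by
        rw [List.replicate_succ, List.cons_append]
      rw [h1, ih]
      simp [List.count_cons]
      omega
    · simp only [List.foldl_cons, if_neg hc]
      rw [List.append_assoc, ih]
      simp [List.count_cons, hc]

-- ===== VERDICT (by name: the statement is the Claim_ definition above) =====
theorem shift_all_0_left_spec : Claim_equal_shift_all_0_left := by
  intro s _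
  unfold Spec_shift_all_0_left shift_all_0_left shift_all_0_left_alt
  have h := shift_inv s.toList 0 []
  simp only [List.replicate_zero, List.nil_append, List.append_nil, Nat.zero_add] at h
  rw [h]
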